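-- pv_equiv track=rewrite | github.com/owsorber/6.00.2x_Coursework | Lecture 2/Exercise1.py | yieldAllCombos
-- ===== SOURCE A (Python) =====
-- def yieldAllCombos(items):
--     """
--         TASK:
--         Generate all combinations of N items into two bags, whereby each
--         item is in one or zero bags.
--
--         Yield a tuple, (bag1, bag2), where each bag is represented as a list
--         of which item(s) are in each bag.
--     """
--     # Your code here
--     N = len(items)
--     for i in range(3**N): # We loop through 3**N possible combinations since now each item has 3 possiblities
--         bag1, bag2 = ([], [])
--         for j in range(N):
--             # Look at the jth bit of integer i
--             # If the bit is 1, put the jth item into bag1; if the bit is 2, put the jth item into bag2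
--             if (i // 3**j) % 3 == 1:
--                 bag1.append(items[j])
--             elif (i // 3**j) % 3 == 2:
--                 bag2.append(items[j])
--         yield (bag1, bag2)
-- ===== SOURCE B (Python) =====
-- def yieldAllCombos(items):
--     """Recursive generator: combos(k) yields all (bag1, bag2) splittings of
--     items[0..k-1], with the choice for item k-1 as the slowest-varying (outer)
--     loop, matching the base-3 counter order of the original."""
--     def combos(k):
--         if k == 0:
--             yield ([], [])
--             return
--         x = items[k - 1]
--         for t in range(3):
--             for (b1, b2) in combos(k - 1):
--                 if t == 1:
--                     yield (b1 + [x], b2)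
--                 elif t == 2:
--                     yield (b1, b2 + [x])
--                 else:
--                     yield (b1, b2)
--     return combos(len(items))
-- ===== Notes on version B (the rewrite author's own statement) =====
-- stated objective: alternative
-- what changed: Replaced the base-3 counter (outer loop over 3**N integers with digit extraction via // and % per item) by a recursive generator combos(k) that extends each combination of the first k-1 items with the three placements of item k-1, outer-looping over the placement so the yield order is identical.
import Mathlib
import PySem

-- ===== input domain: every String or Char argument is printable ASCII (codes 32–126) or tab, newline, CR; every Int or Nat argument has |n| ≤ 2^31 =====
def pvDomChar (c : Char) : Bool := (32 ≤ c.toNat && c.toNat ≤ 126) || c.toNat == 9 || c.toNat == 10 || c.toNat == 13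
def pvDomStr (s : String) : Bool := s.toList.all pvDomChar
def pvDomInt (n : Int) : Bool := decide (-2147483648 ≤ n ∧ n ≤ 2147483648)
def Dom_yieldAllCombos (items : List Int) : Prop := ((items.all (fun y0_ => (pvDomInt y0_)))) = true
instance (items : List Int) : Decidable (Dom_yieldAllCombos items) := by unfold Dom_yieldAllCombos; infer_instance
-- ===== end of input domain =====

-- B is an alternative decomposition (recursive generator over items instead of a base-3
-- counter with digit extraction); same yield sequence, return value only (both are generators).

-- ===== PORT A =====
-- A's loop body: the j-th base-3 digit of i decides where item j goes.
-- range(3**N) and range(N) run over nonnegative ints, so they are ported as List.range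
-- with Nat `/` and `%`, which coincide with Python's // and % on nonnegative operands;
-- items[j] with 0 ≤ j < len(items) is in range, so List.getD j 0 is exact here.
def yieldAllCombos (items : List Int) : List (List Int × List Int) :=
  let N := items.length
  (List.range (3 ^ N)).map (fun i =>
    (List.range N).foldl (fun bags j =>
      if (i / 3 ^ j) % 3 = 1 then (bags.1 ++ [items.getD j 0], bags.2)
      else if (i / 3 ^ j) % 3 = 2 then (bags.1, bags.2 ++ [items.getD j 0])
      else bags) (([], []) : List Int × List Int))

-- ===== PORT B =====
-- combos(k): all splittings of items[0..k-1]; outer loop t = placement of item k-1.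
def combosAlt (items : List Int) : Nat → List (List Int × List Int)
  | 0 => [([], [])]
  | k + 1 =>
    let x := items.getD k 0   -- items[k-1] in B, index in range, exact
    ([0, 1, 2] : List Nat).flatMap (fun t =>
      (combosAlt items k).map (fun bb =>
        if t = 1 then (bb.1 ++ [x], bb.2)
        else if t = 2 then (bb.1, bb.2 ++ [x])
        else bb))

def yieldAllCombos_alt (items : List Int) : List (List Int × List Int) :=
  combosAlt items items.length

-- ===== PRECONDITION & SPEC =====
def Spec_yieldAllCombos (items : List Int) (out : List (List Int × List Int)) : Prop := out = yieldAllCombos_alt items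
instance (items : List Int) (out : List (List Int × List Int)) : Decidable (Spec_yieldAllCombos items out) := by unfold Spec_yieldAllCombos; infer_instance

-- ===== CLAIM (what is proved, stated in full; the proofs are below) =====
def Claim_equal_yieldAllCombos : Prop := ∀ (items : List Int), Dom_yieldAllCombos items → Spec_yieldAllCombos items (yieldAllCombos items)

-- ===== LEMMAS AND PROOFS =====

-- A's loop body as a named step function, and its partial fold (the state after the j-loop
-- has processed positions 0..k-1 for counter value i).
def stepA (items : List Int) (i : Nat) (bags : List Int × List Int) (j : Nat) : List Int × List Int :=
  if (i / 3 ^ j) % 3 = 1 then (bags.1 ++ [items.getD j 0], bags.2)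
  else if (i / 3 ^ j) % 3 = 2 then (bags.1, bags.2 ++ [items.getD j 0])
  else bags

def rowA (items : List Int) (i k : Nat) : List Int × List Int :=
  (List.range k).foldl (stepA items i) ([], [])

theorem yieldAllCombos_eq_rowA (items : List Int) :
    yieldAllCombos items
      = (List.range (3 ^ items.length)).map (fun i => rowA items i items.length) := rfl

theorem foldl_ext_mem {α β : Type} (f g : β → α → β) (l : List α) (b : β)
    (h : ∀ a ∈ l, ∀ x, f x a = g x a) : l.foldl f b = l.foldl g b := by
  induction l generalizing b with
  | nil => rfl
  | cons a l ih =>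
    simp only [List.foldl_cons]
    rw [h a (by simp)]
    exact ih _ (fun a' ha' x => h a' (by simp [ha']) x)

theorem digit_low (t r j k : Nat) (hj : j < k) :
    ((t * 3 ^ k + r) / 3 ^ j) % 3 = (r / 3 ^ j) % 3 := by
  obtain ⟨m, rfl⟩ : ∃ m, k = j + m + 1 := ⟨k - j - 1, by omega⟩
  have h1 : t * 3 ^ (j + m + 1) + r = r + (t * 3 ^ (m + 1)) * 3 ^ j := by ring
  rw [h1, Nat.add_mul_div_right _ _ (pow_pos (by norm_num : (0:Nat) < 3) j)]
  have h2 : t * 3 ^ (m + 1) = (t * 3 ^ m) * 3 := by ring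
  rw [h2, Nat.add_mul_mod_self_right]

theorem digit_high (t r k : Nat) (ht : t < 3) (hr : r < 3 ^ k) :
    ((t * 3 ^ k + r) / 3 ^ k) % 3 = t := by
  have h1 : t * 3 ^ k + r = r + t * 3 ^ k := by ring
  rw [h1, Nat.add_mul_div_right _ _ (pow_pos (by norm_num : (0:Nat) < 3) k),
    Nat.div_eq_of_lt hr, Nat.zero_add, Nat.mod_eq_of_lt ht]

theorem rowA_drop_high (items : List Int) (t r k : Nat) :
    rowA items (t * 3 ^ k + r) k = rowA items r k := by
  unfold rowA
  apply foldl_ext_mem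
  intro j hj x
  have hjk : j < k := List.mem_range.mp hj
  simp [stepA, digit_low t r j k hjk]

theorem rowA_succ (items : List Int) (i k : Nat) :
    rowA items i (k + 1) = stepA items i (rowA items i k) k := by
  simp [rowA, List.range_succ]

theorem main_lemma (items : List Int) (k : Nat) :
    (List.range (3 ^ k)).map (fun i => rowA items i k) = combosAlt items k := by
  induction k with
  | zero => simp [rowA, combosAlt]
  | succ k ih =>
    have hF : ∀ t : Nat, t < 3 →
        (List.range (3 ^ k)).map (fun r => rowA items (t * 3 ^ k + r) (k + 1))
          = (combosAlt items k).map (fun bb =>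
              if t = 1 then (bb.1 ++ [items.getD k 0], bb.2)
              else if t = 2 then (bb.1, bb.2 ++ [items.getD k 0])
              else bb) := by
      intro t ht
      rw [← ih, List.map_map]
      apply List.map_congr_left
      intro r hr
      have hr' : r < 3 ^ k := List.mem_range.mp hr
      show rowA items (t * 3 ^ k + r) (k + 1) = _
      rw [rowA_succ, rowA_drop_high]
      simp [stepA, digit_high t r k ht hr', Function.comp]
    have hF0 := hF 0 (by norm_num)
    have hF1 := hF 1 (by norm_num)
    have hF2 := hF 2 (by norm_num)
    simp only [Nat.zero_mul, Nat.zero_add, Nat.one_mul] at hF0 hF1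
    have hsplit : (3 : Nat) ^ (k + 1) = 3 ^ k + (3 ^ k + 3 ^ k) := by ring
    rw [hsplit, List.range_add, List.map_append, List.range_add, List.map_map,
      List.map_append, List.map_map]
    have e1 : ((fun i => rowA items i (k + 1)) ∘ (fun x => 3 ^ k + x))
        = fun r => rowA items (3 ^ k + r) (k + 1) := rfl
    have e2 : ((fun r => rowA items (3 ^ k + r) (k + 1)) ∘ (fun x => 3 ^ k + x))
        = fun r => rowA items (2 * 3 ^ k + r) (k + 1) := by
      funext r
      show rowA items (3 ^ k + (3 ^ k + r)) (k + 1) = _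
      congr 1
      ring
    rw [e1, e2, hF0, hF1, hF2]
    simp [combosAlt, List.flatMap]

-- ===== VERDICT (by name: the statement is the Claim_ definition above) =====
theorem yieldAllCombos_spec : Claim_equal_yieldAllCombos := by
  intro items _
  unfold Spec_yieldAllCombos yieldAllCombos_alt
  rw [yieldAllCombos_eq_rowA, main_lemma]
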